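-- pv_equiv track=rewrite | github.com/RevanthRaman/BrandOS | utils/crawler_lite.py | check_ai_bot_blocking
-- ===== SOURCE A (Python) =====
-- def check_ai_bot_blocking(robots_content):
--     """
--     Checks if common AI bots are blocked in robots.txt.
--     Returns a dict of {bot_name: status (Allowed/Blocked)}.
--     """
--     if not robots_content:
--         return {"GPTBot": "Unknown (No robots.txt)", "CCBot": "Unknown", "Google-Extended": "Unknown"}
--
--     bots = {
--         "GPTBot": "OpenAI",
--         "CCBot": "Common Crawl",
--         "Google-Extended": "Gemini/Bard",
--         "anthropic-ai": "Claude",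
--         "PerplexityBot": "Perplexity"
--     }
--
--     results = {}
--
--     # Simple parser: check for "User-agent: BotName" followed by "Disallow: /"
--     # This is a heuristic. A full parser is complex, but this covers 90% of "Block All" cases.
--
--     lines = robots_content.split('\n')
--     current_agent = None
--
--     bot_status = {k: "Allowed" for k in bots.keys()} # Default to Allowed
--
--     for line in lines:
--         line = line.strip()
--         if line.lower().startswith('user-agent:'):
--             agent = line.split(':')[1].strip()
--             current_agent = agent
--
--         if line.lower().startswith('disallow:') and current_agent:
--             path = line.split(':')[1].strip()
--             if path == "/": # Blocking root
--                 # Check if current_agent matches any of our bots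
--                 for bot_key in bots.keys():
--                     if bot_key.lower() in current_agent.lower() or current_agent == "*":
--                         # If * is blocked, everyone is blocked (unless specific Allow overrides, which we ignore for simplicity)
--                         bot_status[bot_key] = "Blocked"
--
--     return bot_status
-- ===== SOURCE B (Python) =====
-- def check_ai_bot_blocking(robots_content):
--     """
--     Checks if common AI bots are blocked in robots.txt.
--     Returns a dict of {bot_name: status (Allowed/Blocked)}.
--     """
--     if not robots_content:
--         return {"GPTBot": "Unknown (No robots.txt)", "CCBot": "Unknown", "Google-Extended": "Unknown"}
--
--     bots = ["GPTBot", "CCBot", "Google-Extended", "anthropic-ai", "PerplexityBot"]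
--
--     lines = [l.strip() for l in robots_content.split('\n')]
--
--     # stage 1: agent in effect at each line (after that line's own user-agent directive)
--     agents = []
--     cur = None
--     for l in lines:
--         if l.lower().startswith('user-agent:'):
--             cur = l.split(':')[1].strip()
--         agents.append(cur)
--
--     # stage 2: agent strings whose root is disallowed
--     blocked = set()
--     for l, a in zip(lines, agents):
--         if a is not None and l.lower().startswith('disallow:') and l.split(':')[1].strip() == '/':
--             blocked.add(a)
--
--     # stage 3: verdict per bot
--     return {b: "Blocked" if any(b.lower() in a.lower() or a == "*" for a in blocked) else "Allowed"
--             for b in bots}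
-- ===== Notes on version B (the rewrite author's own statement) =====
-- stated objective: alternative
-- what changed: A is one stateful loop that mutates a per-bot status dict (rescanning the bot list at every blocking line); B is three staged passes: strip the lines, compute the agent-in-effect list by a scan, collect the blocked-agent set by zipping lines with that list, then map each bot to its verdict by querying the set.
import Mathlib
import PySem

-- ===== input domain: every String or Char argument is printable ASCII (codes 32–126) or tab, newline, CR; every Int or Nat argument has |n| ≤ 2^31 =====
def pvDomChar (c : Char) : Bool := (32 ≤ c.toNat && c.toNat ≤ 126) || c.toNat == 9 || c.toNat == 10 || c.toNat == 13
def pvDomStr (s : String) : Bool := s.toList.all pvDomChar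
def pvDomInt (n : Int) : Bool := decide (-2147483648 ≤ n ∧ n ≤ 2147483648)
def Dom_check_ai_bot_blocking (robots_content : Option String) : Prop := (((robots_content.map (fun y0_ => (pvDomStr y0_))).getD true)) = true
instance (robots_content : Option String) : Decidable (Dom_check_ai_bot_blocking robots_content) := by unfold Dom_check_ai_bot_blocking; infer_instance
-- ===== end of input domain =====

-- B replaces A's single stateful loop over a per-bot status dict by three staged
-- passes (strip, agent-in-effect scan, blocked-set collection, verdict map);
-- an alternative decomposition of the same cost class.

-- shared Python expression 'bot_key.lower() in agent.lower() or agent == "*"'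
def pvBotMatch (bot_key agent : String) : Bool :=
  PySem.Str.isIn (PySem.Str.lower bot_key) (PySem.Str.lower agent) || agent == "*"

-- shared Python expression "line.split(':')[1].strip()"; ported with pyGetD: every call
-- site is guarded by a startswith that guarantees a ':' in line, so Python never raises.
def pvAfterColon (line : String) : String :=
  PySem.Str.strip (PySem.List.pyGetD ((PySem.Str.split? line ":").getD []) 1 "")

-- shared 'if line.lower().startswith('user-agent:'): current_agent = …'
def pvAgent (line : String) (ca : Option String) : Option String :=
  if PySem.Str.startswith (PySem.Str.lower line) "user-agent:" then some (pvAfterColon line) else ca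

def pvUnknown : List (String × String) :=
  [("GPTBot", "Unknown (No robots.txt)"), ("CCBot", "Unknown"), ("Google-Extended", "Unknown")]

-- ===== PORT A =====
def pvBots : List (String × String) :=
  [("GPTBot", "OpenAI"), ("CCBot", "Common Crawl"), ("Google-Extended", "Gemini/Bard"),
   ("anthropic-ai", "Claude"), ("PerplexityBot", "Perplexity")]

-- A's disallow branch: 'and current_agent' is Python truthiness (None and "" are falsy);
-- on a blocking line the inner 'for bot_key in bots' loop updates the status dict.
def pvDisA (line : String) (ca : Option String) (d : PySem.Dict String String) :
    PySem.Dict String String :=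
  if PySem.Str.startswith (PySem.Str.lower line) "disallow:" then
    match ca with
    | some ag =>
      if ag = "" then d
      else if pvAfterColon line = "/" then
        (pvBots.map (·.1)).foldl
          (fun d bot_key => if pvBotMatch bot_key ag then d.insert bot_key "Blocked" else d) d
      else d
    | none => d
  else d

-- one iteration of A's 'for line in lines' loop; state = (current_agent, bot_status)
def pvStepA (st : Option String × PySem.Dict String String) (line0 : String) :
    Option String × PySem.Dict String String :=
  let line := PySem.Str.strip line0
  let ca := pvAgent line st.1
  (ca, pvDisA line ca st.2)

def check_ai_bot_blocking (robots_content : Option String) : List (String × String) :=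
  match robots_content with
  | none => pvUnknown
  | some content =>
    if content = "" then pvUnknown
    else
      ((((PySem.Str.split? content "\n").getD []).foldl pvStepA   -- sep ≠ "", never none
          (none, PySem.Dict.ofList (pvBots.map (fun kv => (kv.1, "Allowed"))))).2).items

-- ===== PORT B =====
def pvBotNames : List String :=
  ["GPTBot", "CCBot", "Google-Extended", "anthropic-ai", "PerplexityBot"]

-- stage-1 loop body: update cur from a user-agent line and append it to agents
def pvScanStep (st : Option String × List (Option String)) (l : String) :
    Option String × List (Option String) :=
  let cur := pvAgent l st.1
  (cur, st.2 ++ [cur])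

-- stage-2 loop body over a (line, agent) pair: record the agent of a 'Disallow: /' line
-- (B tests 'a is not None', so an empty agent string is recorded too)
def pvZipStep (s : PySem.Set String) (p : String × Option String) : PySem.Set String :=
  match p.2 with
  | some a =>
    if PySem.Str.startswith (PySem.Str.lower p.1) "disallow:" && (pvAfterColon p.1 == "/")
    then PySem.Set.add s a else s
  | none => s

def check_ai_bot_blocking_alt (robots_content : Option String) : List (String × String) :=
  match robots_content with
  | none => pvUnknown
  | some content =>
    if content = "" then pvUnknown
    else
      let lines := ((PySem.Str.split? content "\n").getD []).map PySem.Str.strip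
      let agents := (lines.foldl pvScanStep (none, [])).2
      let blocked := (lines.zip agents).foldl pvZipStep (PySem.Set.ofList [])
      pvBotNames.map (fun b =>
        (b, if blocked.any (fun a => pvBotMatch b a) then "Blocked" else "Allowed"))

-- ===== PRECONDITION & SPEC =====
def Spec_check_ai_bot_blocking (robots_content : Option String) (out : List (String × String)) : Prop := out = check_ai_bot_blocking_alt robots_content
instance (robots_content : Option String) (out : List (String × String)) : Decidable (Spec_check_ai_bot_blocking robots_content out) := by unfold Spec_check_ai_bot_blocking; infer_instance

-- ===== CLAIM (what is proved, stated in full; the proofs are below) =====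
def Claim_equal_check_ai_bot_blocking : Prop := ∀ (robots_content : Option String), Dom_check_ai_bot_blocking robots_content → Spec_check_ai_bot_blocking robots_content (check_ai_bot_blocking robots_content)

-- ===== LEMMAS AND PROOFS =====

-- A's dict always holds the five bot keys in their fixed order, values given by f
def statusDict (f : String → String) : PySem.Dict String String :=
  PySem.Dict.mk (pvBotNames.map (fun b => (b, f b)))

-- B's verdict for one bot against the blocked-agents list
def pvVerdict (s : List String) (bot : String) : String :=
  if s.any (fun a => pvBotMatch bot a) then "Blocked" else "Allowed"

-- agent-in-effect list over already-stripped lines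
def agentListS : Option String → List String → List (Option String)
  | _, [] => []
  | ca, l :: ls => pvAgent l ca :: agentListS (pvAgent l ca) ls

-- final agent over already-stripped lines
def agentLastS : Option String → List String → Option String
  | ca, [] => ca
  | ca, l :: ls => agentLastS (pvAgent l ca) ls

-- reference blocked-set recursion over RAW lines (strips internally, like A)
def blockedRecRaw : Option String → List String → PySem.Set String → PySem.Set String
  | _, [], s => s
  | ca, l :: ls, s =>
    blockedRecRaw (pvAgent (PySem.Str.strip l) ca) ls
      (pvZipStep s (PySem.Str.strip l, pvAgent (PySem.Str.strip l) ca))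

theorem statusDict_congr (f f' : String → String)
    (h : ∀ b ∈ pvBotNames, f b = f' b) : statusDict f = statusDict f' := by
  unfold statusDict
  congr 1
  exact List.map_congr_left (fun b hb => by rw [h b hb])

theorem any_add (s : PySem.Set String) (a : String) (p : String → Bool) :
    (PySem.Set.add s a).any p = (s.any p || p a) := by
  by_cases h : a ∈ s
  · rw [PySem.Set.add_of_mem h]
    cases hp : p a with
    | false => simp
    | true =>
      have hs : s.any p = true := List.any_eq_true.mpr ⟨a, h, hp⟩
      simp [hs]
  · rw [PySem.Set.add_of_not_mem h]; simp

theorem insert_status (f : String → String) (b : String) (hb : b ∈ pvBotNames) (v : String) :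
    (statusDict f).insert b v = statusDict (fun k => if k == b then v else f k) := by
  fin_cases hb <;>
    (apply PySem.Dict.ext; simp [statusDict, pvBotNames, PySem.Dict.insert])

theorem cond_insert_status (f : String → String) (b : String) (hb : b ∈ pvBotNames)
    (ag : String) :
    (if pvBotMatch b ag then (statusDict f).insert b "Blocked" else statusDict f)
      = statusDict (fun k => if k == b && pvBotMatch b ag then "Blocked" else f k) := by
  by_cases h : pvBotMatch b ag = true
  · rw [if_pos h, insert_status f b hb]
    exact statusDict_congr _ _ (fun k _ => by simp [h])
  · rw [if_neg h]
    exact statusDict_congr _ _ (fun k _ => by simp [Bool.eq_false_iff.mpr h])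

theorem blockfold_status (f : String → String) (ag : String) :
    (pvBots.map (·.1)).foldl
        (fun d bot_key => if pvBotMatch bot_key ag then d.insert bot_key "Blocked" else d)
        (statusDict f)
      = statusDict (fun k => if pvBotMatch k ag then "Blocked" else f k) := by
  rw [show pvBots.map (·.1) = pvBotNames from rfl]
  simp only [pvBotNames, List.foldl_cons, List.foldl_nil]
  rw [cond_insert_status _ _ (by decide), cond_insert_status _ _ (by decide),
      cond_insert_status _ _ (by decide), cond_insert_status _ _ (by decide),
      cond_insert_status _ _ (by decide)]
  apply statusDict_congr
  intro b hb
  fin_cases hb <;> simp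

theorem verdict_add (s : List String) (ag : String) (b : String) :
    pvVerdict (PySem.Set.add s ag) b
      = if pvBotMatch b ag then "Blocked" else pvVerdict s b := by
  unfold pvVerdict
  rw [any_add]
  by_cases h : pvBotMatch b ag = true <;> simp [h]

theorem verdict_add_empty (s : List String) (b : String) (hb : b ∈ pvBotNames) :
    pvVerdict (PySem.Set.add s "") b = pvVerdict s b := by
  rw [verdict_add]
  have h : pvBotMatch b "" = false := by fin_cases hb <;> decide
  simp [h]

-- A's disallow branch on the status dict mirrors one pvZipStep on the blocked set
theorem dis_inv (line : String) (ca : Option String) (s : PySem.Set String) :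
    pvDisA line ca (statusDict (pvVerdict s))
      = statusDict (pvVerdict (pvZipStep s (line, ca))) := by
  unfold pvDisA pvZipStep
  cases hb : PySem.Str.startswith (PySem.Str.lower line) "disallow:" with
  | false =>
    cases ca with
    | none => simp
    | some ag => simp
  | true =>
    simp only [if_pos, Bool.true_and]
    cases ca with
    | none => rfl
    | some ag =>
      simp only [beq_iff_eq]
      by_cases hp : pvAfterColon line = "/"
      · by_cases he : ag = ""
        · subst he
          rw [if_pos rfl, if_pos hp]
          exact (statusDict_congr _ _ (fun b hbm => (verdict_add_empty s b hbm).symm))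
        · rw [if_neg he, if_pos hp, if_pos hp, blockfold_status]
          exact statusDict_congr _ _ (fun b _ => (verdict_add s ag b).symm)
      · rw [if_neg hp, if_neg hp]
        by_cases he : ag = "" <;> simp [he]

-- A's loop maintains current_agent and statusDict-of-verdict of the blocked-set recursion
theorem loop_invA (lines : List String) (ca : Option String) (s : PySem.Set String) :
    lines.foldl pvStepA (ca, statusDict (pvVerdict s))
      = (agentLastS ca (lines.map PySem.Str.strip),
         statusDict (pvVerdict (blockedRecRaw ca lines s))) := by
  induction lines generalizing ca s with
  | nil => rfl
  | cons l ls ih =>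
    rw [List.foldl_cons,
        show pvStepA (ca, statusDict (pvVerdict s)) l
          = (pvAgent (PySem.Str.strip l) ca,
             pvDisA (PySem.Str.strip l) (pvAgent (PySem.Str.strip l) ca)
               (statusDict (pvVerdict s))) from rfl,
        dis_inv, ih]
    simp only [List.map_cons, agentLastS, blockedRecRaw]

-- stage 1 of B computes the agent-in-effect list
theorem scan_spec (ys : List String) (ca : Option String) (acc : List (Option String)) :
    ys.foldl pvScanStep (ca, acc) = (agentLastS ca ys, acc ++ agentListS ca ys) := by
  induction ys generalizing ca acc with
  | nil => simp [agentLastS, agentListS]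
  | cons l ls ih =>
    rw [List.foldl_cons, show pvScanStep (ca, acc) l
          = (pvAgent l ca, acc ++ [pvAgent l ca]) from rfl, ih]
    simp [agentLastS, agentListS]

-- stage 2 of B over stripped lines zipped with their agent list equals the raw recursion
theorem zip_spec (lines : List String) (ca : Option String) (s : PySem.Set String) :
    ((lines.map PySem.Str.strip).zip (agentListS ca (lines.map PySem.Str.strip))).foldl
        pvZipStep s
      = blockedRecRaw ca lines s := by
  induction lines generalizing ca s with
  | nil => rfl
  | cons l ls ih =>
    simp only [List.map_cons, agentListS, List.zip_cons_cons, List.foldl_cons,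
      blockedRecRaw]
    exact ih _ _

-- ===== VERDICT (by name: the statement is the Claim_ definition above) =====
theorem check_ai_bot_blocking_spec : Claim_equal_check_ai_bot_blocking := by
  intro robots_content _
  show check_ai_bot_blocking robots_content = check_ai_bot_blocking_alt robots_content
  cases robots_content with
  | none => rfl
  | some content =>
    simp only [check_ai_bot_blocking, check_ai_bot_blocking_alt]
    by_cases hc : content = ""
    · rw [if_pos hc, if_pos hc]
    · rw [if_neg hc, if_neg hc]
      have h0 : ((none, PySem.Dict.ofList (pvBots.map (fun kv => (kv.1, "Allowed"))))
            : Option String × PySem.Dict String String)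
          = ((none : Option String),
             statusDict (pvVerdict (PySem.Set.ofList ([] : List String)))) := by
        decide
      rw [h0, loop_invA]
      simp only [scan_spec, List.nil_append, zip_spec]
      rfl
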